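-- pv_equiv track=rewrite | github.com/Frost-group/HighThroughputPolarons | mp_analysis.py | categorize_materials
-- ===== SOURCE A (Python) =====
-- element_groups = {
--     'Group13': ['Element B', 'Element Al', 'Element Ga', 'Element In', 'Element Tl'],
--     'Group14': ['Element C', 'Element Si', 'Element Ge', 'Element Sn', 'Element Pb'],
--     'Group15': ['Element N', 'Element P', 'Element As', 'Element Sb', 'Element Bi'],
--     'Group16': ['Element O', 'Element S', 'Element Se', 'Element Te', 'Element Po'],
--     'Group17': ['Element F', 'Element Cl', 'Element Br', 'Element I', 'Element At'],
-- }
--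
-- def categorize_materials(materials):
--     categorized_materials = []
--
--     for material in materials:
--         material_name, crystal_structure, material_elements = material
--         group = "other"
--
--         for group_name, elements_in_group in element_groups.items():
--             if any(element in elements_in_group for element in material_elements):
--                 group = group_name
--                 break
--
--         categorized_materials.append([material_name, crystal_structure, group])
--
--     return categorized_materials
-- ===== SOURCE B (Python) =====
-- element_groups = {
--     'Group13': ['Element B', 'Element Al', 'Element Ga', 'Element In', 'Element Tl'],
--     'Group14': ['Element C', 'Element Si', 'Element Ge', 'Element Sn', 'Element Pb'],
--     'Group15': ['Element N', 'Element P', 'Element As', 'Element Sb', 'Element Bi'],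
--     'Group16': ['Element O', 'Element S', 'Element Se', 'Element Te', 'Element Po'],
--     'Group17': ['Element F', 'Element Cl', 'Element Br', 'Element I', 'Element At'],
-- }
--
-- # Inverted index built once: element name -> (group priority index, group name).
-- _ELEMENT_TO_GROUP = {}
-- for _i, (_gname, _elems) in enumerate(element_groups.items()):
--     for _e in _elems:
--         _ELEMENT_TO_GROUP[_e] = (_i, _gname)
--
-- def _best_hit(material_elements):
--     best = None
--     for element in material_elements:
--         hit = _ELEMENT_TO_GROUP.get(element)
--         if hit is not None and (best is None or hit[0] < best[0]):
--             best = hit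
--     return best
--
-- def categorize_materials(materials):
--     result = []
--     for material_name, crystal_structure, material_elements in materials:
--         best = _best_hit(material_elements)
--         group = best[1] if best is not None else "other"
--         result.append([material_name, crystal_structure, group])
--     return result
-- ===== Notes on version B (the rewrite author's own statement) =====
-- stated objective: faster
-- what changed: Replaces the per-material scan over all groups (with an inner any-membership scan over each group's element list) by an inverted dict from element name to (group index, group name) built once, taking the minimum group index over each material's own elements.
import Mathlib
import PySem

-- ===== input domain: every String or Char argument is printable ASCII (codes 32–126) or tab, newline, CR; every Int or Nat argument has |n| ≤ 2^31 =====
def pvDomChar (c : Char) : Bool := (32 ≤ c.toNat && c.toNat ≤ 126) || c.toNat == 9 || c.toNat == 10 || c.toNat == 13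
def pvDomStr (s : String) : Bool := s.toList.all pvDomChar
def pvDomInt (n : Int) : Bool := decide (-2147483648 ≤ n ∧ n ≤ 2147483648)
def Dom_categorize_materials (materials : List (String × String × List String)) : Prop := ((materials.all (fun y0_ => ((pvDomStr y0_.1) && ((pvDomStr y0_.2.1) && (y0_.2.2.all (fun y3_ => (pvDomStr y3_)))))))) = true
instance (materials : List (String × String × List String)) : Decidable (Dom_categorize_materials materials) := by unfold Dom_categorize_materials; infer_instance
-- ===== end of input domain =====

set_option maxHeartbeats 1000000


-- B replaces A's per-material scan over all groups by a dict from element to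
-- (group index, group name) built once, taking the minimum group index per material (measured faster; same results).

-- ===== PORT A =====
-- the module-level dict element_groups (shared context of both implementations)
def element_groups : List (String × List String) :=
  [("Group13", ["Element B", "Element Al", "Element Ga", "Element In", "Element Tl"]),
   ("Group14", ["Element C", "Element Si", "Element Ge", "Element Sn", "Element Pb"]),
   ("Group15", ["Element N", "Element P", "Element As", "Element Sb", "Element Bi"]),
   ("Group16", ["Element O", "Element S", "Element Se", "Element Te", "Element Po"]),
   ("Group17", ["Element F", "Element Cl", "Element Br", "Element I", "Element At"])]

-- A's inner 'for group_name, elements_in_group in element_groups.items(): if any(...): group = ...; break'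
def findGroup : List (String × List String) → List String → String
  | [], _ => "other"
  | (group_name, elements_in_group) :: rest, material_elements =>
    if material_elements.any (fun element => elements_in_group.contains element) then
      group_name
    else
      findGroup rest material_elements

def categorize_materials (materials : List (String × String × List String)) : List (List String) :=
  materials.foldl
    (fun categorized_materials material =>
      categorized_materials ++ [[material.1, material.2.1, findGroup element_groups material.2.2]])
    []

-- ===== PORT B =====
-- module-level loop of Source B building _ELEMENT_TO_GROUP
def elementToGroup : PySem.Dict String (Int × String) :=
  (PySem.List.enumerate element_groups).foldl
    (fun d p => p.2.2.foldl (fun d e => d.insert e (p.1, p.2.1)) d)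
    PySem.Dict.empty

-- Source B's inner loop over material_elements: keep the hit with the smallest group index
def bestStep (best : Option (Int × String)) (element : String) : Option (Int × String) :=
  match elementToGroup.get? element with
  | some hit =>
    match best with
    | none => some hit
    | some b => if hit.1 < b.1 then some hit else some b
  | none => best

def bestHit (material_elements : List String) : Option (Int × String) :=
  material_elements.foldl bestStep none

def categorize_materials_alt (materials : List (String × String × List String)) : List (List String) :=
  materials.foldl
    (fun result material =>
      result ++ [[material.1, material.2.1,
                  match bestHit material.2.2 with | some b => b.2 | none => "other"]])
    []

-- ===== PRECONDITION & SPEC =====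
def Spec_categorize_materials (materials : List (String × String × List String)) (out : List (List String)) : Prop := out = categorize_materials_alt materials
instance (materials : List (String × String × List String)) (out : List (List String)) : Decidable (Spec_categorize_materials materials out) := by unfold Spec_categorize_materials; infer_instance

-- ===== CLAIM (what is proved, stated in full; the proofs are below) =====
def Claim_equal_categorize_materials : Prop := ∀ (materials : List (String × String × List String)), Dom_categorize_materials materials → Spec_categorize_materials materials (categorize_materials materials)

-- ===== LEMMAS AND PROOFS =====

-- the six possible values of B's accumulator, as a table over 'which groups matched'
def Tb (x0 x1 x2 x3 x4 : Bool) : Option (Int × String) :=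
  if x0 then some (0, "Group13")
  else if x1 then some (1, "Group14")
  else if x2 then some (2, "Group15")
  else if x3 then some (3, "Group16")
  else if x4 then some (4, "Group17")
  else none

def l13 : List String := ["Element B", "Element Al", "Element Ga", "Element In", "Element Tl"]
def l14 : List String := ["Element C", "Element Si", "Element Ge", "Element Sn", "Element Pb"]
def l15 : List String := ["Element N", "Element P", "Element As", "Element Sb", "Element Bi"]
def l16 : List String := ["Element O", "Element S", "Element Se", "Element Te", "Element Po"]
def l17 : List String := ["Element F", "Element Cl", "Element Br", "Element I", "Element At"]

-- the dict of B, evaluated to its literal 25-entry association list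
theorem etg_eq : elementToGroup = PySem.Dict.mk
  [("Element B",(0,"Group13")),("Element Al",(0,"Group13")),("Element Ga",(0,"Group13")),("Element In",(0,"Group13")),("Element Tl",(0,"Group13")),
   ("Element C",(1,"Group14")),("Element Si",(1,"Group14")),("Element Ge",(1,"Group14")),("Element Sn",(1,"Group14")),("Element Pb",(1,"Group14")),
   ("Element N",(2,"Group15")),("Element P",(2,"Group15")),("Element As",(2,"Group15")),("Element Sb",(2,"Group15")),("Element Bi",(2,"Group15")),
   ("Element O",(3,"Group16")),("Element S",(3,"Group16")),("Element Se",(3,"Group16")),("Element Te",(3,"Group16")),("Element Po",(3,"Group16")),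
   ("Element F",(4,"Group17")),("Element Cl",(4,"Group17")),("Element Br",(4,"Group17")),("Element I",(4,"Group17")),("Element At",(4,"Group17"))] := by
  decide

-- the dict lookup of B, characterised by membership in the five group lists
theorem cat_eq (e : String) :
    elementToGroup.get? e =
      Tb (l13.contains e) (l14.contains e) (l15.contains e) (l16.contains e) (l17.contains e) := by
  rw [etg_eq]
  simp only [PySem.Dict.get?_mk_cons, beq_iff_eq]
  by_cases h1 : e = "Element B"
  · subst h1; decide
  rw [if_neg (Ne.symm h1)]
  by_cases h2 : e = "Element Al"
  · subst h2; decide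
  rw [if_neg (Ne.symm h2)]
  by_cases h3 : e = "Element Ga"
  · subst h3; decide
  rw [if_neg (Ne.symm h3)]
  by_cases h4 : e = "Element In"
  · subst h4; decide
  rw [if_neg (Ne.symm h4)]
  by_cases h5 : e = "Element Tl"
  · subst h5; decide
  rw [if_neg (Ne.symm h5)]
  by_cases h6 : e = "Element C"
  · subst h6; decide
  rw [if_neg (Ne.symm h6)]
  by_cases h7 : e = "Element Si"
  · subst h7; decide
  rw [if_neg (Ne.symm h7)]
  by_cases h8 : e = "Element Ge"
  · subst h8; decide
  rw [if_neg (Ne.symm h8)]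
  by_cases h9 : e = "Element Sn"
  · subst h9; decide
  rw [if_neg (Ne.symm h9)]
  by_cases h10 : e = "Element Pb"
  · subst h10; decide
  rw [if_neg (Ne.symm h10)]
  by_cases h11 : e = "Element N"
  · subst h11; decide
  rw [if_neg (Ne.symm h11)]
  by_cases h12 : e = "Element P"
  · subst h12; decide
  rw [if_neg (Ne.symm h12)]
  by_cases h13 : e = "Element As"
  · subst h13; decide
  rw [if_neg (Ne.symm h13)]
  by_cases h14 : e = "Element Sb"
  · subst h14; decide
  rw [if_neg (Ne.symm h14)]
  by_cases h15 : e = "Element Bi"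
  · subst h15; decide
  rw [if_neg (Ne.symm h15)]
  by_cases h16 : e = "Element O"
  · subst h16; decide
  rw [if_neg (Ne.symm h16)]
  by_cases h17 : e = "Element S"
  · subst h17; decide
  rw [if_neg (Ne.symm h17)]
  by_cases h18 : e = "Element Se"
  · subst h18; decide
  rw [if_neg (Ne.symm h18)]
  by_cases h19 : e = "Element Te"
  · subst h19; decide
  rw [if_neg (Ne.symm h19)]
  by_cases h20 : e = "Element Po"
  · subst h20; decide
  rw [if_neg (Ne.symm h20)]
  by_cases h21 : e = "Element F"
  · subst h21; decide
  rw [if_neg (Ne.symm h21)]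
  by_cases h22 : e = "Element Cl"
  · subst h22; decide
  rw [if_neg (Ne.symm h22)]
  by_cases h23 : e = "Element Br"
  · subst h23; decide
  rw [if_neg (Ne.symm h23)]
  by_cases h24 : e = "Element I"
  · subst h24; decide
  rw [if_neg (Ne.symm h24)]
  by_cases h25 : e = "Element At"
  · subst h25; decide
  rw [if_neg (Ne.symm h25)]
  simp [Tb, l13, l14, l15, l16, l17, PySem.Dict.get?, h1, h2, h3, h4, h5, h6, h7, h8, h9, h10, h11, h12, h13, h14, h15, h16, h17, h18, h19, h20, h21, h22, h23, h24, h25]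

-- bestStep merges two table values, taking the earlier group
theorem step_Tb (y0 y1 y2 y3 y4 c0 c1 c2 c3 c4 : Bool) :
    (match Tb c0 c1 c2 c3 c4 with
     | some hit =>
       match Tb y0 y1 y2 y3 y4 with
       | none => some hit
       | some b => if hit.1 < b.1 then some hit else some b
     | none => Tb y0 y1 y2 y3 y4) =
    Tb (y0 || c0) (y1 || c1) (y2 || c2) (y3 || c3) (y4 || c4) := by
  revert y0 y1 y2 y3 y4 c0 c1 c2 c3 c4; decide

theorem fold_char (mes : List String) : ∀ y0 y1 y2 y3 y4 : Bool,
    mes.foldl bestStep (Tb y0 y1 y2 y3 y4) =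
      Tb (y0 || mes.any (fun e => l13.contains e)) (y1 || mes.any (fun e => l14.contains e))
         (y2 || mes.any (fun e => l15.contains e)) (y3 || mes.any (fun e => l16.contains e))
         (y4 || mes.any (fun e => l17.contains e)) := by
  induction mes with
  | nil => intro y0 y1 y2 y3 y4; simp
  | cons e rest ih =>
    intro y0 y1 y2 y3 y4
    rw [List.foldl_cons]
    have hstep : bestStep (Tb y0 y1 y2 y3 y4) e =
        Tb (y0 || l13.contains e) (y1 || l14.contains e) (y2 || l15.contains e)
           (y3 || l16.contains e) (y4 || l17.contains e) := by
      unfold bestStep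
      rw [cat_eq e]
      exact step_Tb y0 y1 y2 y3 y4 _ _ _ _ _
    rw [hstep, ih]
    simp [Bool.or_assoc]

theorem render_Tb (x0 x1 x2 x3 x4 : Bool) :
    (if x0 then "Group13" else if x1 then "Group14" else if x2 then "Group15"
     else if x3 then "Group16" else if x4 then "Group17" else "other") =
      (match Tb x0 x1 x2 x3 x4 with | some b => b.2 | none => "other") := by
  revert x0 x1 x2 x3 x4; decide

theorem A_char (mes : List String) :
    findGroup element_groups mes =
      (match Tb (mes.any (fun e => l13.contains e)) (mes.any (fun e => l14.contains e))
               (mes.any (fun e => l15.contains e)) (mes.any (fun e => l16.contains e))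
               (mes.any (fun e => l17.contains e)) with
       | some b => b.2 | none => "other") := by
  simp only [findGroup, element_groups, l13, l14, l15, l16, l17]
  exact render_Tb _ _ _ _ _

-- ===== VERDICT (by name: the statement is the Claim_ definition above) =====
theorem categorize_materials_spec : Claim_equal_categorize_materials := by
  intro materials hdom
  unfold Spec_categorize_materials categorize_materials categorize_materials_alt
  induction materials using List.reverseRecOn with
  | nil => rfl
  | append_singleton rest m ih =>
    have hrest : Dom_categorize_materials rest := by
      unfold Dom_categorize_materials at hdom ⊢
      simp only [List.all_append, Bool.and_eq_true] at hdom
      exact hdom.1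
    rw [List.foldl_append, List.foldl_append, ih hrest, List.foldl_cons, List.foldl_cons,
        List.foldl_nil, List.foldl_nil]
    have h := fold_char m.2.2 false false false false false
    simp only [Bool.false_or] at h
    have hb : bestHit m.2.2 = Tb (m.2.2.any fun e => l13.contains e)
        (m.2.2.any fun e => l14.contains e) (m.2.2.any fun e => l15.contains e)
        (m.2.2.any fun e => l16.contains e) (m.2.2.any fun e => l17.contains e) := by
      rw [bestHit]; exact h
    rw [A_char, hb]
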